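-- pv_equiv track=rewrite | github.com/hulkiokantabak/fx-try-risk-lab | scripts/build_browser_data.py | normalize_match_key
-- ===== SOURCE A (Python) =====
-- def normalize_match_key(value: str) -> str:
--     tokens: list[str] = []
--     current: list[str] = []
--     for character in value.casefold():
--         if character.isalnum():
--             current.append(character)
--             continue
--         if current:
--             tokens.append("".join(current))
--             current = []
--     if current:
--         tokens.append("".join(current))
--     return " ".join(tokens)
-- ===== SOURCE B (Python) =====
-- def normalize_match_key(value: str) -> str:
--     folded = value.casefold()
--     cleaned = "".join(c if c.isalnum() else " " for c in folded)
--     return " ".join(cleaned.split())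
-- ===== Notes on version B (the rewrite author's own statement) =====
-- stated objective: simpler
-- what changed: Replaces the explicit token-accumulation state machine (tokens/current lists with manual flushes) with a map-then-split decomposition: map non-alphanumerics to spaces, then let str.split() collapse runs and strip ends.
import Mathlib
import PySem

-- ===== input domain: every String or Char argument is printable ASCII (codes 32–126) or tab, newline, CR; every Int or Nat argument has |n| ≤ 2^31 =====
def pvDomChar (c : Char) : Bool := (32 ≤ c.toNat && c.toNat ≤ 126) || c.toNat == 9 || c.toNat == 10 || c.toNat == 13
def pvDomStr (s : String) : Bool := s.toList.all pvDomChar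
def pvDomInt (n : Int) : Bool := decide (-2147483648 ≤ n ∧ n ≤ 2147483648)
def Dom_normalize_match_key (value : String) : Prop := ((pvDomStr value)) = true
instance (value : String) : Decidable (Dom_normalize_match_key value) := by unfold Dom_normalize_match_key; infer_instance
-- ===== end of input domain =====

-- B replaces A's explicit token-accumulation state machine with a simpler map-then-split decomposition.


-- ===== PORT A =====
-- Python's str.casefold is ported as PySem.Chars.lower: exact on the ASCII domain Dom_.
-- the loop body: alnum chars extend `current`, otherwise a nonempty `current` is flushed to `tokens`
def nmkStep (st : List (List Char) × List Char) (c : Char) : List (List Char) × List Char :=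
  if PySem.Chars.isalnum c then (st.1, st.2 ++ [c])
  else if st.2.isEmpty then st else (st.1 ++ [st.2], [])

def normalize_match_key (value : String) : String :=
  let st := (PySem.Chars.lower value.toList).foldl nmkStep ([], [])
  let tokens := if st.2.isEmpty then st.1 else st.1 ++ [st.2]
  String.mk (PySem.Chars.join [' '] tokens)

-- ===== PORT B =====
-- Python's str.casefold is ported as PySem.Chars.lower: exact on the ASCII domain Dom_.
def normalize_match_key_alt (value : String) : String :=
  let folded := PySem.Chars.lower value.toList
  let cleaned := folded.map (fun c => if PySem.Chars.isalnum c then c else ' ')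
  String.mk (PySem.Chars.join [' '] (PySem.Chars.split₀ cleaned))

-- ===== PRECONDITION & SPEC =====
def Spec_normalize_match_key (value : String) (out : String) : Prop := out = normalize_match_key_alt value
instance (value : String) (out : String) : Decidable (Spec_normalize_match_key value out) := by unfold Spec_normalize_match_key; infer_instance

-- ===== CLAIM (what is proved, stated in full; the proofs are below) =====
def Claim_equal_normalize_match_key : Prop := ∀ (value : String), Dom_normalize_match_key value → Spec_normalize_match_key value (normalize_match_key value)

-- ===== LEMMAS AND PROOFS =====

-- an alphanumeric character is never whitespace (true for all of Unicode's ranges in PySem)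
theorem nmk_alnum_not_space (c : Char) (h : PySem.Chars.isalnum c = true) :
    PySem.Chars.isspace c = false := by
  simp only [PySem.Chars.isalnum, PySem.Chars.isalpha, PySem.Chars.isdigit, PySem.Chars.isupper,
    PySem.Chars.islower, PySem.Chars.isspace, Bool.or_eq_true, Bool.and_eq_true, decide_eq_true_eq,
    Bool.or_eq_false_iff, Bool.and_eq_false_iff, decide_eq_false_iff_not, Char.le_def,
    UInt32.le_iff_toNat_le, Char.toNat] at *
  simp at h ⊢
  omega

theorem nmk_go_nil (cur : List Char) (acc : List (List Char)) :
    PySem.Chars.split₀.go [] cur acc =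
      if cur.isEmpty then acc.reverse else (cur.reverse :: acc).reverse := rfl

theorem nmk_go_cons (c : Char) (rest cur : List Char) (acc : List (List Char)) :
    PySem.Chars.split₀.go (c :: rest) cur acc =
      if PySem.Chars.isspace c then
        (if cur.isEmpty then PySem.Chars.split₀.go rest [] acc
         else PySem.Chars.split₀.go rest [] (cur.reverse :: acc))
      else PySem.Chars.split₀.go rest (c :: cur) acc := rfl

theorem nmk_go_acc (cs : List Char) (cur : List Char) (acc : List (List Char)) :
    PySem.Chars.split₀.go cs cur acc = acc.reverse ++ PySem.Chars.split₀.go cs cur [] := by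
  induction cs generalizing cur acc with
  | nil => rw [nmk_go_nil, nmk_go_nil]; split_ifs <;> simp
  | cons c rest ih =>
    rw [nmk_go_cons, nmk_go_cons]
    split_ifs with h1 h2
    · rw [ih [] acc]
    · rw [ih [] (cur.reverse :: acc), ih [] [cur.reverse]]; simp
    · exact ih _ _

-- the characterisation of A's loop: flushing the final state of the fold equals split₀ of the cleaned string
theorem nmk_loop_eq_split (cs : List Char) (toks : List (List Char)) (cur : List Char) :
    (let st := cs.foldl nmkStep (toks, cur);
     if st.2.isEmpty then st.1 else st.1 ++ [st.2]) =
    toks ++ PySem.Chars.split₀.go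
      (cs.map (fun c => if PySem.Chars.isalnum c then c else ' ')) cur.reverse [] := by
  induction cs generalizing toks cur with
  | nil =>
    rw [List.map_nil, List.foldl_nil, nmk_go_nil]
    by_cases h : cur.isEmpty = true <;> simp_all
  | cons c rest ih =>
    rw [List.map_cons, List.foldl_cons]
    by_cases ha : PySem.Chars.isalnum c = true
    · rw [if_pos ha, nmk_go_cons, nmk_alnum_not_space c ha]
      simp only [Bool.false_eq_true, if_false]
      simp only [nmkStep, if_pos ha]
      rw [ih]
      simp
    · rw [if_neg ha, nmk_go_cons]
      have hsp : PySem.Chars.isspace ' ' = true := by decide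
      rw [hsp, if_pos rfl]
      by_cases hc : cur.isEmpty = true
      · simp only [nmkStep, if_neg ha, if_pos hc]
        have hcur : cur = [] := by simpa using hc
        subst hcur
        simpa using ih toks []
      · simp only [nmkStep, if_neg ha, if_neg hc]
        have hrc : cur.reverse.isEmpty = false := by cases cur <;> simp_all
        rw [hrc]
        simp only [Bool.false_eq_true, if_false]
        rw [ih, nmk_go_acc _ [] [cur.reverse.reverse]]
        simp

-- ===== VERDICT (by name: the statement is the Claim_ definition above) =====
theorem normalize_match_key_spec : Claim_equal_normalize_match_key := by
  intro value _
  unfold Spec_normalize_match_key normalize_match_key normalize_match_key_alt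
  simp only [PySem.Chars.split₀]
  have := nmk_loop_eq_split (PySem.Chars.lower value.toList) [] []
  simp only [List.reverse_nil, List.nil_append] at this
  rw [this]
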